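-- pv_equiv track=rewrite | github.com/lorenzofman/LineCode | LineCodes.py | differential_manchester
-- ===== SOURCE A (Python) =====
-- high_level = 5
--
-- low_level = -5
--
-- def differential_manchester(bits):
--     encoded = []
--     first = low_level
--     second = high_level
--     for bit in bits:
--         if bit == 0:
--             encoded.append(first)
--             encoded.append(second)
--         else:
--             first, second = second, first
--             encoded.append(first)
--             encoded.append(second)
--     return encoded
-- ===== SOURCE B (Python) =====
-- high_level = 5
--
-- low_level = -5
--
-- def differential_manchester(bits):
--     # prefix parity of nonzero bits (post-toggle state), then flatten to pairs
--     parities = []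
--     p = False
--     for b in bits:
--         p ^= (b != 0)
--         parities.append(p)
--     return [v for p in parities
--               for v in ((high_level, low_level) if p else (low_level, high_level))]
-- ===== Notes on version B (the rewrite author's own statement) =====
-- stated objective: alternative
-- what changed: Replaces the mutable (first, second) swap-pair threaded through one loop with a prefix-parity pass over the bits followed by a flattening comprehension mapping each parity to its level pair.
import Mathlib
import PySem

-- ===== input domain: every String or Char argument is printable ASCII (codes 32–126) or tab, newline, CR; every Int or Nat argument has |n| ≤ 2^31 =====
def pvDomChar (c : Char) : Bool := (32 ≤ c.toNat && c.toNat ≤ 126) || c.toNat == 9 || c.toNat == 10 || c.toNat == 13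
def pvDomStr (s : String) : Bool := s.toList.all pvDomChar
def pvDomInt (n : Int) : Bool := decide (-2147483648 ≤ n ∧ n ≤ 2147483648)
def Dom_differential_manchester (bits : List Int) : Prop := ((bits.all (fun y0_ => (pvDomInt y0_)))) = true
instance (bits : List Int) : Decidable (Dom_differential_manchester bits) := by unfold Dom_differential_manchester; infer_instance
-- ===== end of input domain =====

-- B replaces A's mutable swap-pair loop by a prefix-parity pass followed by a flattening map (alternative decomposition, same cost).


-- ===== PORT A =====
-- fold over (encoded, first, second), exactly A's loop
def differential_manchester (bits : List Int) : List Int :=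
  (bits.foldl (fun (s : List Int × Int × Int) bit =>
      if bit == 0 then (s.1 ++ [s.2.1, s.2.2], s.2.1, s.2.2)
      else (s.1 ++ [s.2.2, s.2.1], s.2.2, s.2.1))
    ([], -5, 5)).1

-- ===== PORT B =====
-- prefix parities (post-toggle state per bit)
def dmParities : List Int → Bool → List Bool
  | [], _ => []
  | b :: t, p =>
    let p' := xor p (b != 0)
    p' :: dmParities t p'

def differential_manchester_alt (bits : List Int) : List Int :=
  (dmParities bits false).flatMap (fun p => if p then [5, -5] else [-5, 5])

-- ===== PRECONDITION & SPEC =====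
def Spec_differential_manchester (bits : List Int) (out : List Int) : Prop := out = differential_manchester_alt bits
instance (bits : List Int) (out : List Int) : Decidable (Spec_differential_manchester bits out) := by unfold Spec_differential_manchester; infer_instance

-- ===== CLAIM (what is proved, stated in full; the proofs are below) =====
def Claim_equal_differential_manchester : Prop := ∀ (bits : List Int), Dom_differential_manchester bits → Spec_differential_manchester bits (differential_manchester bits)

-- ===== LEMMAS AND PROOFS =====
lemma dm_key (bits : List Int) (acc : List Int) (p : Bool) :
    (bits.foldl (fun (s : List Int × Int × Int) bit =>
        if bit == 0 then (s.1 ++ [s.2.1, s.2.2], s.2.1, s.2.2)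
        else (s.1 ++ [s.2.2, s.2.1], s.2.2, s.2.1))
      (acc, (if p then 5 else -5 : Int), (if p then -5 else 5 : Int))).1
    = acc ++ (dmParities bits p).flatMap (fun q => if q then [5, -5] else [-5, 5]) := by
  induction bits generalizing acc p with
  | nil => simp [dmParities]
  | cons b t ih =>
    simp only [List.foldl_cons]
    by_cases hb : b = 0
    · have hbt : (b != 0) = false := by simp [hb]
      cases p
      · have h := ih (acc ++ [-5, 5]) false
        simp only [List.append_assoc, List.cons_append, List.nil_append] at h
        simpa [hb, hbt, dmParities] using h
      · have h := ih (acc ++ [5, -5]) true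
        simp only [List.append_assoc, List.cons_append, List.nil_append] at h
        simpa [hb, hbt, dmParities] using h
    · have hbt : (b != 0) = true := by simp [hb]
      cases p
      · have h := ih (acc ++ [5, -5]) true
        simp only [List.append_assoc, List.cons_append, List.nil_append] at h
        simpa [hb, hbt, dmParities] using h
      · have h := ih (acc ++ [-5, 5]) false
        simp only [List.append_assoc, List.cons_append, List.nil_append] at h
        simpa [hb, hbt, dmParities] using h

-- ===== VERDICT (by name: the statement is the Claim_ definition above) =====
theorem differential_manchester_spec : Claim_equal_differential_manchester := by
  intro bits _
  unfold Spec_differential_manchester differential_manchester differential_manchester_alt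
  have := dm_key bits [] false
  simpa using this
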